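-- pv_equiv track=rewrite | github.com/DanieduUSB/verano2024 | matriz.py | maxMatriz
-- ===== SOURCE A (Python) =====
-- def maxMatriz(n):
--
--     premax = []
--
--     for column in range(0, len(n)):
--         premax.append(n[column][0])
--
--     for column in range(0,len(n)):
--         for number in range(1,len(n[column])):
--             if n[column][number] > premax[column]:
--                 premax[column] = n[column][number]
--
--     maxnumber = premax[0]
--
--     for element in range(1,len(premax)):
--         if premax[element] > maxnumber:
--             maxnumber = premax[element]
--
--     return maxnumber
-- ===== SOURCE B (Python) =====
-- def maxMatriz(n):
--     maxnumber = n[0][0]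
--     for row in n:
--         for x in row:
--             if x > maxnumber:
--                 maxnumber = x
--     return maxnumber
-- ===== Notes on version B (the rewrite author's own statement) =====
-- stated objective: simpler
-- what changed: Drops the premax intermediate list and its three index loops; B seeds the running maximum from n[0][0] and takes a single nested pass directly over the rows and their elements.
import Mathlib
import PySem

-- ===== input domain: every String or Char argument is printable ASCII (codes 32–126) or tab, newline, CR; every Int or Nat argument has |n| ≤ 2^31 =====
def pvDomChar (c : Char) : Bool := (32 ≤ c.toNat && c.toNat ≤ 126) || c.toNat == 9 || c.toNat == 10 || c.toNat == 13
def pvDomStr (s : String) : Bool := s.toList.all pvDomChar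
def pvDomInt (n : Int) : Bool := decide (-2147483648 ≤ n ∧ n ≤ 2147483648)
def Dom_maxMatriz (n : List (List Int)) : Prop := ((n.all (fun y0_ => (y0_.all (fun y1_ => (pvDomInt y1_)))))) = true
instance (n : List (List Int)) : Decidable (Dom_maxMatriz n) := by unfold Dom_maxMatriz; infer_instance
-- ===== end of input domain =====

-- B drops A's premax intermediate list and its three index loops: one nested pass with a running maximum seeded from n[0][0] (objective: simpler).

-- ===== PORT A =====
-- first loop: premax = [n[column][0] for each column]
def maxMatrizPremax1 (n : List (List Int)) : List Int :=
  (PySem.List.pyRange 0 n.length 1).foldl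
    (fun premax column => premax ++ [PySem.List.pyGetD (PySem.List.pyGetD n column []) 0 0]) []

-- second (nested) loop: premax[column] = max of row `column`
def maxMatrizPremax2 (n : List (List Int)) : List Int :=
  (PySem.List.pyRange 0 n.length 1).foldl
    (fun premax column =>
      (PySem.List.pyRange 1 (PySem.List.pyGetD n column []).length 1).foldl
        (fun premax number =>
          if PySem.List.pyGetD (PySem.List.pyGetD n column []) number 0 >
               PySem.List.pyGetD premax column 0 then
            PySem.List.pySetD premax column
              (PySem.List.pyGetD (PySem.List.pyGetD n column []) number 0)
          else premax) premax) (maxMatrizPremax1 n)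

-- third loop: maxnumber over premax
def maxMatriz (n : List (List Int)) : Int :=
  let premax := maxMatrizPremax2 n
  let maxnumber := PySem.List.pyGetD premax 0 0
  (PySem.List.pyRange 1 premax.length 1).foldl
    (fun maxnumber element =>
      if PySem.List.pyGetD premax element 0 > maxnumber then
        PySem.List.pyGetD premax element 0
      else maxnumber) maxnumber

-- ===== PORT B =====
def maxMatriz_alt (n : List (List Int)) : Int :=
  let init : Int := PySem.List.pyGetD (PySem.List.pyGetD n 0 []) 0 0
  n.foldl (fun maxnumber row =>
    row.foldl (fun maxnumber x => if x > maxnumber then x else maxnumber) maxnumber) init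

-- ===== PRECONDITION & SPEC =====
-- Pre_ excludes exactly the inputs where A raises IndexError (n[column][0]): the empty matrix and matrices containing an empty row.
def Pre_maxMatriz (n : List (List Int)) : Prop := n ≠ [] ∧ ∀ row ∈ n, row ≠ []
instance (n : List (List Int)) : Decidable (Pre_maxMatriz n) := by unfold Pre_maxMatriz; infer_instance
def pvWitness_maxMatriz : List (List Int) := [[1, 5], [3, 2]]

def Spec_maxMatriz (n : List (List Int)) (out : Int) : Prop := out = maxMatriz_alt n
instance (n : List (List Int)) (out : Int) : Decidable (Spec_maxMatriz n out) := by unfold Spec_maxMatriz; infer_instance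

-- ===== CLAIM (what is proved, stated in full; the proofs are below) =====
def Claim_equal_maxMatriz : Prop := ∀ (n : List (List Int)), Dom_maxMatriz n → Pre_maxMatriz n → Spec_maxMatriz n (maxMatriz n)

-- ===== LEMMAS AND PROOFS =====

-- the maximum of a row as both programs compute it: fold of max over the tail, seeded from the head
def rowMax (r : List Int) : Int := (r.drop 1).foldl max (PySem.List.pyGetD r 0 0)

-- the running-max step is `max`
theorem if_gt_eq_max (m x : Int) : (if x > m then x else m) = max m x := by
  rw [max_def]; split_ifs <;> omega

-- foldl max over an Int list commutes with an outer max on the seed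
theorem foldl_max_max (l : List Int) (a b : Int) :
    l.foldl max (max a b) = max a (l.foldl max b) := by
  induction l generalizing b with
  | nil => rfl
  | cons x l ih => simp only [List.foldl_cons, max_assoc, ih]

-- A's inner index loop (as a fold over the tail of the row) only rewrites position c of premax
theorem inner_loop_char (t : List Int) (c : Nat) :
    ∀ pm : List Int, c < pm.length →
      t.foldl (fun pm x =>
          if x > PySem.List.pyGetD pm (c : Int) 0 then PySem.List.pySetD pm (c : Int) x else pm) pm
        = PySem.List.pySetD pm (c : Int) (t.foldl max (PySem.List.pyGetD pm (c : Int) 0)) := by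
  induction t with
  | nil =>
    intro pm hc
    simp only [List.foldl_nil, PySem.List.pySetD_natCast, PySem.List.pyGetD_natCast]
    rw [List.getD_eq_getElem pm 0 hc]
    exact (List.set_getElem_self hc).symm
  | cons x t ih =>
    intro pm hc
    simp only [List.foldl_cons]
    by_cases hx : x > PySem.List.pyGetD pm (c : Int) 0
    · rw [if_pos hx, ih _ (by rw [PySem.List.length_pySetD]; exact hc)]
      rw [PySem.List.pyGetD_pySetD_natCast _ _ _ _ _ hc, if_pos rfl]
      simp only [PySem.List.pySetD_natCast, List.set_set]
      rw [max_eq_right (le_of_lt hx)]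
    · rw [if_neg hx, ih pm hc, max_eq_left (by omega)]

-- A's outer loop over columns a..len(n): positions below a untouched, positions c ≥ a become the row-max of row c seeded from premax[c]
theorem outer_loop_char (n : List (List Int)) :
    ∀ (k a : Nat), a + k = n.length → ∀ pm : List Int, pm.length = n.length →
      (((PySem.List.pyRange a n.length 1).foldl
        (fun premax column =>
          (PySem.List.pyRange 1 (PySem.List.pyGetD n column []).length 1).foldl
            (fun premax number =>
              if PySem.List.pyGetD (PySem.List.pyGetD n column []) number 0 >
                   PySem.List.pyGetD premax column 0 then
                PySem.List.pySetD premax column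
                  (PySem.List.pyGetD (PySem.List.pyGetD n column []) number 0)
              else premax) premax) pm).length = n.length)
      ∧ ∀ c : Nat, c < n.length →
          ((PySem.List.pyRange a n.length 1).foldl
            (fun premax column =>
              (PySem.List.pyRange 1 (PySem.List.pyGetD n column []).length 1).foldl
                (fun premax number =>
                  if PySem.List.pyGetD (PySem.List.pyGetD n column []) number 0 >
                       PySem.List.pyGetD premax column 0 then
                    PySem.List.pySetD premax column
                      (PySem.List.pyGetD (PySem.List.pyGetD n column []) number 0)
                  else premax) premax) pm).getD c 0
          = if c < a then pm.getD c 0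
            else ((PySem.List.pyGetD n (c : Int) []).drop 1).foldl max (pm.getD c 0) := by
  intro k
  induction k with
  | zero =>
    intro a ha pm hpm
    rw [PySem.List.pyRange_one_eq_nil (by exact_mod_cast (by omega : n.length ≤ a))]
    refine ⟨hpm, fun c hc => ?_⟩
    rw [if_pos (by omega)]
    rfl
  | succ k ih =>
    intro a ha pm hpm
    have hlt : a < n.length := by omega
    have hai : (a : Int) < (n.length : Int) := by exact_mod_cast hlt
    rw [PySem.List.pyRange_one_cons hai]
    simp only [List.foldl_cons]
    rw [PySem.List.foldl_pyRange_pyGetD' (PySem.List.pyGetD n (a : Int) []) 0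
         (fun acc x => if x > PySem.List.pyGetD acc (a : Int) 0
                       then PySem.List.pySetD acc (a : Int) x else acc) pm (by norm_num)]
    simp only [Int.toNat_one]
    rw [inner_loop_char _ a pm (by omega)]
    set v : Int := ((PySem.List.pyGetD n (a : Int) []).drop 1).foldl max
        (PySem.List.pyGetD pm (a : Int) 0) with hv
    have hcast : (a : Int) + 1 = ((a + 1 : Nat) : Int) := by push_cast; ring
    rw [hcast]
    obtain ⟨hlen, hpt⟩ := ih (a + 1) (by omega) (PySem.List.pySetD pm (a : Int) v)
        (by rw [PySem.List.length_pySetD]; exact hpm)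
    refine ⟨hlen, fun c hc => ?_⟩
    rw [hpt c hc]
    have hgd : (PySem.List.pySetD pm (a : Int) v).getD c 0
        = if c = a then v else pm.getD c 0 := by
      rw [← PySem.List.pyGetD_natCast, PySem.List.pyGetD_pySetD_natCast _ _ _ _ _ (by omega)]
      simp [PySem.List.pyGetD_natCast]
    rw [hgd]
    have hpma : PySem.List.pyGetD pm (a : Int) 0 = pm.getD a 0 := PySem.List.pyGetD_natCast pm a 0
    rcases Nat.lt_trichotomy c a with h | h | h
    · rw [if_pos (by omega), if_neg (by omega), if_pos h]
    · subst h
      rw [if_pos (by omega), if_pos rfl, if_neg (by omega), hv, hpma]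
    · rw [if_neg (by omega), if_neg (by omega), if_neg (by omega)]

-- the first loop builds the list of row heads
theorem premax1_eq (n : List (List Int)) :
    maxMatrizPremax1 n = n.map (fun r => PySem.List.pyGetD r 0 0) := by
  unfold maxMatrizPremax1
  rw [PySem.List.foldl_pyRange_zero_pyGetD' n []
      (fun acc r => acc ++ [PySem.List.pyGetD r 0 0]) []]
  rw [PySem.List.foldl_append_singleton_eq_map]
  simp

-- after the nested loop, premax holds the maximum of each row
theorem premax2_eq (n : List (List Int)) : maxMatrizPremax2 n = n.map rowMax := by
  unfold maxMatrizPremax2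
  rw [premax1_eq]
  obtain ⟨hlen, hpt⟩ := outer_loop_char n n.length 0 (by omega)
      (n.map (fun r => PySem.List.pyGetD r 0 0)) (by simp)
  simp only [Nat.cast_zero] at hlen hpt
  apply List.ext_getElem (by rw [hlen]; simp)
  intro i h1 h2
  rw [← List.getD_eq_getElem _ 0 h1, ← List.getD_eq_getElem _ 0 h2]
  rw [hpt i (by rwa [hlen] at h1), if_neg (by omega)]
  have hi : i < n.length := by rwa [hlen] at h1
  rw [PySem.List.pyGetD_natCast n i []]
  rw [List.getD_eq_getElem _ 0 h2, List.getElem_map,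
      List.getD_eq_getElem _ 0 (by simpa using hi), List.getElem_map,
      List.getD_eq_getElem n _ hi]
  rfl

-- A computes the running max of the row maxima
theorem maxMatriz_eq (n : List (List Int)) :
    maxMatriz n = ((n.map rowMax).drop 1).foldl max
      (PySem.List.pyGetD (n.map rowMax) 0 0) := by
  unfold maxMatriz
  rw [premax2_eq]
  rw [PySem.List.foldl_pyRange_pyGetD' (n.map rowMax) 0
      (fun acc x => if x > acc then x else acc) _ (by norm_num)]
  simp only [Int.toNat_one, if_gt_eq_max]

theorem rowMax_cons (h : Int) (t : List Int) : rowMax (h :: t) = t.foldl max h := by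
  simp [rowMax, PySem.List.pyGetD_zero_cons]

-- one nested pass over nonempty rows equals folding max over the row maxima
theorem rows_foldl (rs : List (List Int)) :
    ∀ m : Int, (∀ r ∈ rs, r ≠ []) →
      rs.foldl (fun m r => r.foldl max m) m = (rs.map rowMax).foldl max m := by
  induction rs with
  | nil => intro m _; rfl
  | cons r rs ih =>
    intro m hne
    obtain ⟨h, t, rfl⟩ : ∃ h t, r = h :: t := by
      cases r with
      | nil => exact absurd rfl (hne [] (by simp))
      | cons h t => exact ⟨h, t, rfl⟩
    simp only [List.foldl_cons, List.map_cons, rowMax_cons]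
    rw [foldl_max_max]
    exact ih _ (fun r hr => hne r (by simp [hr]))

theorem maxMatriz_spec : Claim_equal_maxMatriz := by
  intro n _ hpre
  obtain ⟨hne, hrows⟩ := hpre
  obtain ⟨r0, rs, rfl⟩ : ∃ r0 rs, n = r0 :: rs := by
    cases n with
    | nil => exact absurd rfl hne
    | cons r0 rs => exact ⟨r0, rs, rfl⟩
  obtain ⟨h, t, rfl⟩ : ∃ h t, r0 = h :: t := by
    cases r0 with
    | nil => exact absurd rfl (hrows [] (by simp))
    | cons h t => exact ⟨h, t, rfl⟩
  show maxMatriz _ = maxMatriz_alt _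
  rw [maxMatriz_eq]
  unfold maxMatriz_alt
  simp only [List.map_cons, List.drop_succ_cons, List.drop_zero,
    PySem.List.pyGetD_zero_cons, List.foldl_cons, if_gt_eq_max]
  rw [rows_foldl rs _ (fun r hr => hrows r (by simp [hr]))]
  simp only [max_self]
  rw [rowMax_cons]
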